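-- pv_equiv track=rewrite | github.com/kayvandharsee/code-dump | Python/COMP 202 A3.py | is_valid_text
-- ===== SOURCE A (Python) =====
-- def is_valid_text(text, ch_min, ch_max):
--     '''
--     Returns True if the ASCII code for each character in the variable text is
--     greater than or equal to ch_min and less than or equal to ch_max. When
--     ch_min and ch_max are whole numbers, it will ignore the negative
--     sign in text at the beginning
--
--     Parameters:
--         text(str): A string
--         ch_min(str): A string that will represent the minimal value
--         ch_max(str): A string that will represent the maximum value
--     Returns:
--         (bool): True or False depending on the value of the characters in text
--
--     Examples:
--         >>>is_valid_text("abcndf", "a", "z")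
--         True
--         >>>is_valid_text("abcndf", "A", "Z")
--         False
--         >>> is_valid_text("-324", "1", "9")
--         True
--     '''
-- # This variable will help if ignoring the negative is needed
--     start = 0
--
-- # This if statement will ignore the negative if needed
--     if (ch_min.isdecimal() and ch_max.isdecimal() and text[0] == "-"):
--
--         start += 1
--
-- # This for loop will traverse the characters in text to return the correct bool
--     for i in range(start, len(text)):
--
--         if (text[i] < ch_min or text[i] > ch_max):
--
--             return False
--
--     return True
-- ===== SOURCE B (Python) =====
-- def is_valid_text(text, ch_min, ch_max):
--     start = 0
--     if ch_min.isdecimal() and ch_max.isdecimal() and text[0] == "-":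
--         start = 1
--     sub = text[start:]
--     if not sub:
--         return True
--     return min(sub) >= ch_min and max(sub) <= ch_max
-- ===== Notes on version B (the rewrite author's own statement) =====
-- stated objective: simpler
-- what changed: Instead of walking the characters and testing each against both bounds with early exit, B computes the two extreme characters of the relevant substring with min/max and makes two aggregate comparisons.
import Mathlib
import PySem

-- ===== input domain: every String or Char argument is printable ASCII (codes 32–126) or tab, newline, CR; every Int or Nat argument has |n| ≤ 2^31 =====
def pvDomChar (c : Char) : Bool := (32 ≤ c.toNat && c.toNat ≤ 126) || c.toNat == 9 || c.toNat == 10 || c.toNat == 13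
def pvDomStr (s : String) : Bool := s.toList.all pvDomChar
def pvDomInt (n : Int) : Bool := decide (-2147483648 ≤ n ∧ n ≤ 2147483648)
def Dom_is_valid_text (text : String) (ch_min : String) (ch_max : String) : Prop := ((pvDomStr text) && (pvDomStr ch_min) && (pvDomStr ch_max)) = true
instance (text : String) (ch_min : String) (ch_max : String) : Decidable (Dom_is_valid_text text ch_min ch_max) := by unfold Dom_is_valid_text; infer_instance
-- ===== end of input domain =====

-- B replaces A's per-character two-bound test with min/max extremes and two aggregate
-- comparisons (objective: simpler); same O(n) cost, return value identical on Pre_.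

-- s.isdecimal(): nonempty and all characters decimal digits — exact on the ASCII domain
def pyIsDecimal (s : List Char) : Bool :=
  !s.isEmpty && s.all (fun c => decide ('0' ≤ c) && decide (c ≤ '9'))

-- the negative-sign guard both Pythons share verbatim ('start'); text[0] == '-' read
-- through headD, reached only when text ≠ "" (Pre_ excludes the IndexError case)
def pvStart (t m M : List Char) : Nat :=
  if pyIsDecimal m && pyIsDecimal M && decide (t.headD ' ' = '-') then 1 else 0

-- ===== PORT A =====
-- A's for-loop over text[start:] with early `return False`
-- (Python's str '<' / '>' is code-point lexicographic = '<' on List Char, per PySem)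
def pvScanA : List Char → List Char → List Char → Bool
  | [], _, _ => true
  | c :: rest, m, M =>
      if decide (([c] : List Char) < m) || decide (M < ([c] : List Char)) then false
      else pvScanA rest m M

def is_valid_text (text : String) (ch_min : String) (ch_max : String) : Bool :=
  pvScanA (text.toList.drop (pvStart text.toList ch_min.toList ch_max.toList))
    ch_min.toList ch_max.toList

-- ===== PORT B =====
-- min(sub) / max(sub): Python folds keeping the current extreme (strict comparison)
def is_valid_text_alt (text : String) (ch_min : String) (ch_max : String) : Bool :=
  match text.toList.drop (pvStart text.toList ch_min.toList ch_max.toList) with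
  | [] => true
  | c :: rest =>
      decide ((ch_min.toList : List Char) ≤ [rest.foldl (fun acc x => if x < acc then x else acc) c])
      && decide (([rest.foldl (fun acc x => if acc < x then x else acc) c] : List Char) ≤ ch_max.toList)

-- ===== PRECONDITION & SPEC =====
-- Pre_ excludes exactly the inputs where Python A raises IndexError at text[0]:
-- empty text with both bounds decimal (B raises the same way there).
def Pre_is_valid_text (text : String) (ch_min : String) (ch_max : String) : Prop :=
  ¬ (pyIsDecimal ch_min.toList = true ∧ pyIsDecimal ch_max.toList = true ∧ text = "")
instance (text : String) (ch_min : String) (ch_max : String) : Decidable (Pre_is_valid_text text ch_min ch_max) := by unfold Pre_is_valid_text; infer_instance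

def pvWitness_is_valid_text : String × String × String := ("-324", "1", "9")

def Spec_is_valid_text (text : String) (ch_min : String) (ch_max : String) (out : Bool) : Prop := out = is_valid_text_alt text ch_min ch_max
instance (text : String) (ch_min : String) (ch_max : String) (out : Bool) : Decidable (Spec_is_valid_text text ch_min ch_max out) := by unfold Spec_is_valid_text; infer_instance

-- ===== CLAIM (what is proved, stated in full; the proofs are below) =====
def Claim_equal_is_valid_text : Prop := ∀ (text : String) (ch_min : String) (ch_max : String), Dom_is_valid_text text ch_min ch_max → Pre_is_valid_text text ch_min ch_max → Spec_is_valid_text text ch_min ch_max (is_valid_text text ch_min ch_max)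

-- ===== LEMMAS AND PROOFS =====

theorem pv_singleton_le_singleton {a b : Char} (h : a ≤ b) : ([a] : List Char) ≤ [b] := by
  rcases lt_or_eq_of_le h with h | h
  · exact le_of_lt (List.Lex.rel h)
  · simp [h]

-- A's scan is the conjunction of the two-bound test over all characters
theorem pvScanA_eq_all (m M : List Char) : ∀ l : List Char,
    pvScanA l m M = l.all (fun c => decide ((m : List Char) ≤ [c]) && decide (([c] : List Char) ≤ M))
  | [] => rfl
  | c :: rest => by
      rw [pvScanA, pvScanA_eq_all m M rest]
      by_cases h1 : ([c] : List Char) < m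
      · simp [h1, not_le.mpr h1]
      · by_cases h2 : M < ([c] : List Char)
        · simp [h1, h2, not_le.mpr h2]
        · simp [h1, h2, not_lt.mp h1, not_lt.mp h2]

-- the fold computing min(sub): result is an element and a lower bound
theorem pv_fmin_spec : ∀ (l : List Char) (a : Char),
    (l.foldl (fun acc x => if x < acc then x else acc) a = a ∨
       l.foldl (fun acc x => if x < acc then x else acc) a ∈ l) ∧
    l.foldl (fun acc x => if x < acc then x else acc) a ≤ a ∧
    ∀ x ∈ l, l.foldl (fun acc x => if x < acc then x else acc) a ≤ x
  | [], a => by simp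
  | y :: l, a => by
      obtain ⟨hmem, hle, hall⟩ := pv_fmin_spec l (if y < a then y else a)
      refine ⟨?_, ?_, ?_⟩
      · simp only [List.foldl_cons]
        rcases hmem with h | h
        · rw [h]; split_ifs with hy
          · exact Or.inr (List.mem_cons_self)
          · exact Or.inl rfl
        · exact Or.inr (List.mem_cons_of_mem _ h)
      · simp only [List.foldl_cons]
        refine le_trans hle ?_
        split_ifs with hy
        · exact le_of_lt hy
        · exact le_refl a
      · intro x hx
        simp only [List.foldl_cons]
        rcases List.mem_cons.mp hx with h | h
        · subst h
          refine le_trans hle ?_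
          split_ifs with hy
          · exact le_refl x
          · exact not_lt.mp hy
        · exact hall x h

-- the fold computing max(sub): result is an element and an upper bound
theorem pv_fmax_spec : ∀ (l : List Char) (a : Char),
    (l.foldl (fun acc x => if acc < x then x else acc) a = a ∨
       l.foldl (fun acc x => if acc < x then x else acc) a ∈ l) ∧
    a ≤ l.foldl (fun acc x => if acc < x then x else acc) a ∧
    ∀ x ∈ l, x ≤ l.foldl (fun acc x => if acc < x then x else acc) a
  | [], a => by simp
  | y :: l, a => by
      obtain ⟨hmem, hle, hall⟩ := pv_fmax_spec l (if a < y then y else a)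
      refine ⟨?_, ?_, ?_⟩
      · simp only [List.foldl_cons]
        rcases hmem with h | h
        · rw [h]; split_ifs with hy
          · exact Or.inr (List.mem_cons_self)
          · exact Or.inl rfl
        · exact Or.inr (List.mem_cons_of_mem _ h)
      · simp only [List.foldl_cons]
        refine le_trans ?_ hle
        split_ifs with hy
        · exact le_of_lt hy
        · exact le_refl a
      · intro x hx
        simp only [List.foldl_cons]
        rcases List.mem_cons.mp hx with h | h
        · subst h
          refine le_trans ?_ hle
          split_ifs with hy
          · exact le_refl x
          · exact not_lt.mp hy
        · exact hall x h

-- extremes-then-compare equals the all-characters test, on a nonempty list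
theorem pv_extremes_eq_all (m M : List Char) (c : Char) (rest : List Char) :
    (decide ((m : List Char) ≤ [rest.foldl (fun acc x => if x < acc then x else acc) c])
      && decide (([rest.foldl (fun acc x => if acc < x then x else acc) c] : List Char) ≤ M))
    = (c :: rest).all (fun x => decide ((m : List Char) ≤ [x]) && decide (([x] : List Char) ≤ M)) := by
  obtain ⟨hminmem, hminle, hminall⟩ := pv_fmin_spec rest c
  obtain ⟨hmaxmem, hmaxle, hmaxall⟩ := pv_fmax_spec rest c
  rw [Bool.eq_iff_iff]
  simp only [Bool.and_eq_true, decide_eq_true_eq, List.all_eq_true]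
  constructor
  · rintro ⟨hm, hM⟩ x hx
    have hmin_le_x : rest.foldl (fun acc x => if x < acc then x else acc) c ≤ x := by
      rcases List.mem_cons.mp hx with h | h
      · subst h; exact hminle
      · exact hminall x h
    have hx_le_max : x ≤ rest.foldl (fun acc x => if acc < x then x else acc) c := by
      rcases List.mem_cons.mp hx with h | h
      · subst h; exact hmaxle
      · exact hmaxall x h
    exact ⟨le_trans hm (pv_singleton_le_singleton hmin_le_x),
           le_trans (pv_singleton_le_singleton hx_le_max) hM⟩
  · intro h
    have h1 := h _ (by rcases hminmem with hh | hh
                       · exact List.mem_cons.mpr (Or.inl hh)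
                       · exact List.mem_cons_of_mem _ hh)
    have h2 := h _ (by rcases hmaxmem with hh | hh
                       · exact List.mem_cons.mpr (Or.inl hh)
                       · exact List.mem_cons_of_mem _ hh)
    exact ⟨h1.1, h2.2⟩

theorem pv_main_eq (text ch_min ch_max : String) :
    is_valid_text text ch_min ch_max = is_valid_text_alt text ch_min ch_max := by
  unfold is_valid_text is_valid_text_alt
  cases h : text.toList.drop (pvStart text.toList ch_min.toList ch_max.toList) with
  | nil => rfl
  | cons c rest =>
      rw [pvScanA_eq_all]
      exact (pv_extremes_eq_all ch_min.toList ch_max.toList c rest).symm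

-- ===== VERDICT (by name: the statement is the Claim_ definition above) =====
theorem is_valid_text_spec : Claim_equal_is_valid_text := by
  intro text ch_min ch_max _ _
  unfold Spec_is_valid_text
  exact pv_main_eq text ch_min ch_max
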